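-- pv_equiv track=rewrite | github.com/encrypted-def/kakao-blind-recruitment | 2022-blind/Q1.py | solution
-- ===== SOURCE A (Python) =====
-- def solution(id_list, report, k):
--     s2i = {} # 아이디를 0, 1, 2, ..의 인덱스로 변환
--     n = len(id_list)
--     s = [set() for _ in range(n)] # s[i] : i를 신고한 사람의 집합
--     cnt = [0] * n
--
--     for i in range(n):
--         s2i[id_list[i]] = i
--
--     for rep in report:
--         id1, id2 = rep.split()
--         s[s2i[id2]].add(s2i[id1])
--
--     for i in range(n):
--         if len(s[i]) < k: continue
--         for x in s[i]: cnt[x] += 1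
--
--     return cnt
-- ===== SOURCE B (Python) =====
-- def solution(id_list, report, k):
--     pairs = {tuple(rep.split()) for rep in report}
--     banned = {t for (_, t) in pairs
--               if sum(1 for (_, t2) in pairs if t2 == t) >= k}
--     return [sum(1 for (r, t) in pairs if r == uid and t in banned)
--             for uid in id_list]
-- ===== Notes on version B (the rewrite author's own statement) =====
-- stated objective: simpler
-- what changed: B replaces A's id-to-index dict, per-target list of reporter-index sets and nested index loops by one flat set of deduplicated (reporter, target) string pairs, a banned-target set derived from it by counting, and one counting comprehension per uid. Pre_ excludes reports that do not split into two known ids (A raises ValueError/KeyError there) and id_lists with duplicate ids, on which A's last-wins dict indexing credits all of a duplicate uid's tally to its last position while B reports the same tally at every occurrence.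
-- outside the precondition, e.g. on solution(['a', 'a', 'b'], ['b a', 'a a'], 1): A returns [0, 1, 1], B returns [1, 1, 1]
import Mathlib
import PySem

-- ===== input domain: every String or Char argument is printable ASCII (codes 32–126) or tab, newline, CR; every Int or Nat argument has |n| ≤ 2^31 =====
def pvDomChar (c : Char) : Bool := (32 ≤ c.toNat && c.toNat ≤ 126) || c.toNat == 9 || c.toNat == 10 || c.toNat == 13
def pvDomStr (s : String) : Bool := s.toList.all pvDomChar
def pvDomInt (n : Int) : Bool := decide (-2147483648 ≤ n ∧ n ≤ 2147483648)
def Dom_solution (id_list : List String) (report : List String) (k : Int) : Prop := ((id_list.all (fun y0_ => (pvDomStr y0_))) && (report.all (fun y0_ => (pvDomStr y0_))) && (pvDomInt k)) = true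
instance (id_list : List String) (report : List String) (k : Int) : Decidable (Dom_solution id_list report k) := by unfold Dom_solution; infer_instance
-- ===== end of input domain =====

-- B replaces A's id-to-index dict, per-target reporter-index sets and nested index loops by one flat
-- deduplicated set of (reporter, target) string pairs and counting comprehensions over it (objective: simpler).


-- ===== PORT A =====
-- s2i = {}; for i in range(n): s2i[id_list[i]] = i
def buildS2i (id_list : List String) : PySem.Dict String Int :=
  (PySem.List.pyRange 0 (id_list.length : Int) 1).foldl (fun d i =>
    match PySem.List.pyGet? id_list i with
    | some name => d.insert name i
    | none => d) PySem.Dict.empty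

-- s = [set() for _ in range(n)]; for rep in report: id1, id2 = rep.split(); s[s2i[id2]].add(s2i[id1])
-- (a rep that does not split into two tokens raises ValueError, an unknown id raises KeyError:
--  both excluded by Pre_solution; the port leaves s unchanged there)
def buildS (id_list : List String) (report : List String) : List (PySem.Set Int) :=
  report.foldl (fun s rep =>
    match PySem.Str.split₀ rep with
    | [id1, id2] =>
      match (buildS2i id_list).get? id2, (buildS2i id_list).get? id1 with
      | some j, some i => s.modify j.toNat (fun st => PySem.Set.add st i)
      | _, _ => s
    | _ => s)
    ((PySem.List.pyRange 0 (id_list.length : Int) 1).map (fun _ => PySem.Set.empty))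

-- cnt = [0]*n; for i in range(n): if len(s[i]) < k: continue; for x in s[i]: cnt[x] += 1
-- (the inner 'for x in s[i]' only increments counters, so the untracked hash order of the set is immaterial)
def solution (id_list : List String) (report : List String) (k : Int) : List Int :=
  let s := buildS id_list report
  (PySem.List.pyRange 0 (id_list.length : Int) 1).foldl (fun cnt i =>
    match PySem.List.pyGet? s i with
    | some st =>
      if PySem.Set.len st < k then cnt
      else st.foldl (fun cnt x => cnt.modify x.toNat (· + 1)) cnt
    | none => cnt) (PySem.List.pyRepeat [0] (id_list.length : Int))

-- ===== PORT B =====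
-- tuple(rep.split()) — none when the split is not a 2-tuple (Source B raises later when unpacking
-- such a tuple; Pre_solution excludes those inputs)
def pairOf (rep : String) : Option (String × String) :=
  match PySem.Str.split₀ rep with
  | [a, b] => some (a, b)
  | _ => none

def solution_alt (id_list : List String) (report : List String) (k : Int) : List Int :=
  let pairs : PySem.Set (String × String) := PySem.Set.ofList (report.filterMap pairOf)
  let banned : PySem.Set String :=
    PySem.Set.ofList ((pairs.filter (fun p => decide (k ≤ (pairs.countP (fun q => q.2 == p.2) : Int)))).map (fun p => p.2))
  id_list.map (fun uid =>
    ((pairs.countP (fun p => p.1 == uid && PySem.Set.contains banned p.2)) : Int))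

-- ===== PRECONDITION & SPEC =====
-- Pre_ excludes reports that do not split into two ids present in id_list (A raises ValueError or
-- KeyError there) and id_lists with duplicate ids, on which A's last-wins dict reindexing credits a
-- duplicate uid's whole tally to its last position (an accident of the duplicate-key overwrite)
-- while B repeats the tally at every occurrence.
def Pre_solution (id_list : List String) (report : List String) (k : Int) : Prop :=
  id_list.Nodup ∧
  ∀ rep ∈ report, (PySem.Str.split₀ rep).length = 2 ∧ ∀ t ∈ PySem.Str.split₀ rep, t ∈ id_list
instance (id_list : List String) (report : List String) (k : Int) : Decidable (Pre_solution id_list report k) := by unfold Pre_solution; infer_instance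
def pvWitness_solution : List String × List String × Int := (["muzi", "frodo", "apeach"], ["muzi frodo", "apeach frodo"], 2)

def Spec_solution (id_list : List String) (report : List String) (k : Int) (out : List Int) : Prop := out = solution_alt id_list report k
instance (id_list : List String) (report : List String) (k : Int) (out : List Int) : Decidable (Spec_solution id_list report k out) := by unfold Spec_solution; infer_instance

-- ===== CLAIM (what is proved, stated in full; the proofs are below) =====
def Claim_equal_solution : Prop := ∀ (id_list : List String) (report : List String) (k : Int), Dom_solution id_list report k → Pre_solution id_list report k → Spec_solution id_list report k (solution id_list report k)

-- ===== LEMMAS AND PROOFS =====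

def pvIdx (id_list : List String) (a : String) : Int := ((List.idxOf a id_list : Nat) : Int)

def pvStOf (id_list : List String) (L : List (String × String)) (t : String) : PySem.Set Int :=
  PySem.Set.ofList ((L.filter (fun p => p.2 == t)).map (fun p => pvIdx id_list p.1))

theorem s2iAux (id_list : List String) (hnd : id_list.Nodup) (m : Nat) (hm : m ≤ id_list.length) (name : String) :
    ((List.range m).foldl (fun d (i : Nat) => match PySem.List.pyGet? id_list ((i : Nat) : Int) with
        | some nm => d.insert nm ((i : Nat) : Int)
        | none => d) PySem.Dict.empty).get? name
    = if name ∈ id_list.take m then some ((List.idxOf name id_list : Nat) : Int) else none := by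
  induction m with
  | zero => simp [PySem.Dict.get?_empty]
  | succ m ih =>
    have hm' : m ≤ id_list.length := by omega
    have hlt : m < id_list.length := by omega
    rw [List.range_succ, List.foldl_append]
    simp only [List.foldl_cons, List.foldl_nil]
    rw [PySem.List.pyGet?_natCast, List.getElem?_eq_getElem hlt]
    simp only []
    rw [PySem.Dict.get?_insert, ih hm']
    rw [List.take_add_one, List.getElem?_eq_getElem hlt]
    by_cases h : name = id_list[m]
    · subst h
      have hmem : id_list[m] ∈ List.take (m + 1) id_list := by
        have ht := List.take_add_one (l := id_list) (i := m)
        rw [ht, List.getElem?_eq_getElem hlt]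
        exact List.mem_append_right _ (by simp)
      rw [if_pos rfl, List.Nodup.idxOf_getElem hnd m hlt]
      simp [hmem]
    · rw [if_neg h]
      simp only [List.mem_append, List.mem_singleton, Option.toList_some]
      by_cases h2 : name ∈ id_list.take m
      · simp [h2]
      · simp [h2, h]

theorem buildS2i_get (id_list : List String) (hnd : id_list.Nodup) (name : String) (hm : name ∈ id_list) :
    (buildS2i id_list).get? name = some ((List.idxOf name id_list : Nat) : Int) := by
  unfold buildS2i
  rw [PySem.List.pyRange_zero_natCast, List.foldl_map]
  rw [s2iAux id_list hnd id_list.length le_rfl name]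
  rw [List.take_length, if_pos hm]

theorem buildS_step (id_list : List String) (hnd : id_list.Nodup) (L : List (String × String))
    (a b : String) (ha : a ∈ id_list) (hb : b ∈ id_list) :
    (id_list.map (pvStOf id_list L)).modify (List.idxOf b id_list)
      (fun st => PySem.Set.add st (pvIdx id_list a))
    = id_list.map (pvStOf id_list (L ++ [(a, b)])) := by
  apply List.ext_getElem
  · simp [List.length_modify]
  · intro j h1 h2
    rw [List.getElem_modify]
    rw [List.getElem_map]
    have hj : j < id_list.length := by simpa using h2
    have hR : pvStOf id_list (L ++ [(a, b)]) id_list[j]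
        = if b = id_list[j]
          then PySem.Set.add (pvStOf id_list L id_list[j]) (pvIdx id_list a)
          else pvStOf id_list L id_list[j] := by
      unfold pvStOf
      rw [List.filter_append]
      by_cases hbt : b = id_list[j]
      · rw [if_pos hbt]
        have : List.filter (fun p => p.2 == id_list[j]) [(a, b)] = [(a, b)] := by
          simp [hbt]
        rw [this, List.map_append]
        simp [PySem.Set.ofList_append_singleton]
      · rw [if_neg hbt]
        have : List.filter (fun p => p.2 == id_list[j]) [(a, b)] = [] := by
          simp [hbt]
        rw [this, List.append_nil]
    rw [List.getElem_map, hR]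
    by_cases hij : List.idxOf b id_list = j
    · have : b = id_list[j] := by
        subst hij; exact (List.getElem_idxOf (List.idxOf_lt_length_of_mem hb)).symm
      rw [if_pos hij, if_pos this]
    · have : ¬ b = id_list[j] := by
        intro h; apply hij; subst h; exact List.Nodup.idxOf_getElem hnd j hj
      rw [if_neg hij, if_neg this]

theorem buildSAux (id_list : List String) (hnd : id_list.Nodup) (report : List String)
    (hrep : ∀ rep ∈ report, (PySem.Str.split₀ rep).length = 2 ∧ ∀ t ∈ PySem.Str.split₀ rep, t ∈ id_list)
    (L : List (String × String)) :
    report.foldl (fun s rep =>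
      match PySem.Str.split₀ rep with
      | [id1, id2] =>
        match (buildS2i id_list).get? id2, (buildS2i id_list).get? id1 with
        | some j, some i => s.modify j.toNat (fun st => PySem.Set.add st i)
        | _, _ => s
      | _ => s) (id_list.map (pvStOf id_list L))
    = id_list.map (pvStOf id_list (L ++ report.filterMap pairOf)) := by
  induction report generalizing L with
  | nil => simp
  | cons rep rest ih =>
    obtain ⟨hlen, hmem⟩ := hrep rep (List.mem_cons_self)
    obtain ⟨a, b, hab⟩ := List.length_eq_two.mp hlen
    have ha : a ∈ id_list := hmem a (by rw [hab]; simp)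
    have hb : b ∈ id_list := hmem b (by rw [hab]; simp)
    rw [List.foldl_cons]
    have hstep : (match PySem.Str.split₀ rep with
      | [id1, id2] =>
        match (buildS2i id_list).get? id2, (buildS2i id_list).get? id1 with
        | some j, some i => (id_list.map (pvStOf id_list L)).modify j.toNat (fun st => PySem.Set.add st i)
        | _, _ => id_list.map (pvStOf id_list L)
      | _ => id_list.map (pvStOf id_list L))
      = id_list.map (pvStOf id_list (L ++ [(a, b)])) := by
      rw [hab]
      simp only [buildS2i_get id_list hnd b hb, buildS2i_get id_list hnd a ha, Int.toNat_natCast]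
      exact buildS_step id_list hnd L a b ha hb
    rw [hstep, ih (fun r hr => hrep r (List.mem_cons_of_mem _ hr)) (L ++ [(a, b)])]
    have : pairOf rep = some (a, b) := by unfold pairOf; rw [hab]
    rw [List.filterMap_cons, this]
    simp

theorem buildS_eq (id_list : List String) (report : List String) (hnd : id_list.Nodup)
    (hrep : ∀ rep ∈ report, (PySem.Str.split₀ rep).length = 2 ∧ ∀ t ∈ PySem.Str.split₀ rep, t ∈ id_list) :
    buildS id_list report = id_list.map (pvStOf id_list (report.filterMap pairOf)) := by
  unfold buildS
  have hinit : (PySem.List.pyRange 0 (id_list.length : Int) 1).map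
      (fun _ => (PySem.Set.empty : PySem.Set Int)) = id_list.map (pvStOf id_list []) := by
    rw [PySem.List.pyRange_zero_natCast, List.map_map]
    apply List.ext_getElem
    · simp
    · intro j h1 h2
      simp [pvStOf, PySem.Set.ofList_nil, PySem.Set.empty]
  rw [hinit, buildSAux id_list hnd report hrep []]
  simp

theorem incrFold_length (st : List Int) (c : List Int) :
    (st.foldl (fun c x => c.modify x.toNat (· + 1)) c).length = c.length := by
  induction st generalizing c with
  | nil => rfl
  | cons x st ih => rw [List.foldl_cons, ih, List.length_modify]

theorem incrFold_getD (st : List Int) (c : List Int)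
    (hst : ∀ x ∈ st, 0 ≤ x ∧ x.toNat < c.length) (i : Nat) (hi : i < c.length) :
    (st.foldl (fun c x => c.modify x.toNat (· + 1)) c).getD i 0
    = c.getD i 0 + (st.countP (fun x => x == (i : Int)) : Int) := by
  induction st generalizing c with
  | nil => simp
  | cons x st ih =>
    obtain ⟨hx0, hxl⟩ := hst x List.mem_cons_self
    rw [List.foldl_cons]
    have hlen : (c.modify x.toNat (· + 1)).length = c.length := List.length_modify _ _ _
    rw [ih (c.modify x.toNat (· + 1))
        (fun y hy => by rw [hlen]; exact hst y (List.mem_cons_of_mem _ hy)) (hlen ▸ hi)]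
    rw [List.getD_eq_getElem _ _ (hlen ▸ hi), List.getD_eq_getElem _ _ hi]
    rw [List.getElem_modify]
    rw [List.countP_cons]
    by_cases hxi : x = (i : Int)
    · have : x.toNat = i := by omega
      rw [if_pos this]
      simp [hxi]
      omega
    · have : ¬ x.toNat = i := by omega
      rw [if_neg this]
      simp [hxi]

def pvStep (s : List (PySem.Set Int)) (k : Int) (cnt : List Int) (j : Nat) : List Int :=
  match PySem.List.pyGet? s ((j : Nat) : Int) with
  | some st => if PySem.Set.len st < k then cnt
               else st.foldl (fun cnt x => cnt.modify x.toNat (· + 1)) cnt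
  | none => cnt

theorem outerFold_length (s : List (PySem.Set Int)) (k : Int) (rng : List Nat) (c : List Int) :
    (rng.foldl (pvStep s k) c).length = c.length := by
  unfold pvStep
  induction rng generalizing c with
  | nil => rfl
  | cons j rng ih =>
    rw [List.foldl_cons, ih]
    cases hg : PySem.List.pyGet? s ((j : Nat) : Int) with
    | none => rfl
    | some st =>
      simp only
      by_cases hk : PySem.Set.len st < k
      · rw [if_pos hk]
      · rw [if_neg hk, incrFold_length]

theorem outerFoldAux (id_list : List String) (f : String → PySem.Set Int) (k : Int)
    (hf : ∀ t ∈ id_list, ∀ x ∈ f t, 0 ≤ x ∧ x.toNat < id_list.length)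
    (m : Nat) (hm : m ≤ id_list.length) (c : List Int) (hc : c.length = id_list.length)
    (i : Nat) (hi : i < id_list.length) :
    ((List.range m).foldl (pvStep (id_list.map f) k) c).getD i 0
    = c.getD i 0 + ((id_list.take m).map
        (fun t => if PySem.Set.len (f t) < k then 0
                  else ((f t).countP (fun x => x == (i : Int)) : Int))).sum := by
  induction m with
  | zero => simp
  | succ m ih =>
    have hm' : m ≤ id_list.length := by omega
    have hlt : m < id_list.length := by omega
    rw [List.range_succ, List.foldl_append, List.foldl_cons, List.foldl_nil]
    have hg : PySem.List.pyGet? (id_list.map f) ((m : Nat) : Int) = some (f id_list[m]) := by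
      rw [PySem.List.pyGet?_natCast, List.getElem?_map, List.getElem?_eq_getElem hlt]
      rfl
    have hpv : ∀ c' : List Int, pvStep (id_list.map f) k c' m
        = if PySem.Set.len (f id_list[m]) < k then c'
          else (f id_list[m]).foldl (fun cnt x => cnt.modify x.toNat (· + 1)) c' := by
      intro c'; unfold pvStep; rw [hg]
    rw [hpv]
    have hfoldlen : ((List.range m).foldl (pvStep (id_list.map f) k) c).length = c.length :=
      outerFold_length _ _ _ _
    have ht := List.take_add_one (l := id_list) (i := m)
    rw [ht, List.getElem?_eq_getElem hlt]
    simp only [Option.toList_some, List.map_append, List.map_cons, List.map_nil, List.sum_append,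
      List.sum_cons, List.sum_nil, add_zero]
    by_cases hk : PySem.Set.len (f id_list[m]) < k
    · rw [if_pos hk, ih hm', if_pos hk]
      ring
    · rw [if_neg hk]
      rw [incrFold_getD _ _ (fun x hx => by
            rw [hfoldlen, hc]; exact hf id_list[m] (List.getElem_mem hlt) x hx)
          i (by rw [hfoldlen, hc]; exact hi)]
      rw [ih hm', if_neg hk]
      ring

theorem pvOfList_filter {α : Type} [BEq α] [LawfulBEq α] (p : α → Bool) (xs : List α) :
    PySem.Set.ofList (xs.filter p) = (PySem.Set.ofList xs).filter p := by
  induction xs using List.reverseRecOn with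
  | nil => simp [PySem.Set.ofList_nil]
  | append_singleton xs x ih =>
    rw [List.filter_append, PySem.Set.ofList_append_singleton]
    by_cases hp : p x = true
    · simp only [List.filter_cons, hp, if_pos, List.filter_nil]
      rw [PySem.Set.ofList_append_singleton, ih]
      rw [PySem.Set.add_eq_ite, PySem.Set.add_eq_ite]
      by_cases hx : x ∈ PySem.Set.ofList xs
      · rw [if_pos hx, if_pos (by simp [List.mem_filter, hx, hp])]
      · rw [if_neg hx, if_neg (by simp [List.mem_filter, hx])]
        rw [List.filter_append]
        simp [hp]
    · simp only [List.filter_cons, hp]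
      simp only [Bool.false_eq_true, if_false, List.filter_nil, List.append_nil]
      rw [ih, PySem.Set.add_eq_ite]
      by_cases hx : x ∈ PySem.Set.ofList xs
      · rw [if_pos hx]
      · rw [if_neg hx, List.filter_append]
        simp [hp]

theorem pvOfList_map_inj {α β : Type} [BEq α] [LawfulBEq α] [BEq β] [LawfulBEq β]
    (f : α → β) (xs : List α) (hinj : ∀ x ∈ xs, ∀ y ∈ xs, f x = f y → x = y) :
    PySem.Set.ofList (xs.map f) = (PySem.Set.ofList xs).map f := by
  induction xs using List.reverseRecOn with
  | nil => simp [PySem.Set.ofList_nil]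
  | append_singleton xs x ih =>
    have hinj' : ∀ x' ∈ xs, ∀ y ∈ xs, f x' = f y → x' = y := fun a ha b hb =>
      hinj a (List.mem_append_left _ ha) b (List.mem_append_left _ hb)
    rw [List.map_append, List.map_singleton, PySem.Set.ofList_append_singleton,
        PySem.Set.ofList_append_singleton, ih hinj']
    rw [PySem.Set.add_eq_ite, PySem.Set.add_eq_ite]
    by_cases hx : x ∈ PySem.Set.ofList xs
    · rw [if_pos hx, if_pos (List.mem_map_of_mem hx)]
    · rw [if_neg hx, if_neg ?_, List.map_append, List.map_singleton]
      intro hmem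
      obtain ⟨y, hy, hfy⟩ := List.mem_map.mp hmem
      have hyxs : y ∈ xs := (PySem.Set.mem_ofList _ _).mp hy
      have : y = x := hinj y (List.mem_append_left _ hyxs) x (by simp) hfy
      exact hx (this ▸ hy)

theorem pvCountP_subset {α : Type} [DecidableEq α] (l₁ l₂ : List α) (r : α → Bool)
    (h1 : l₁.Nodup) (h2 : l₂.Nodup) (hsub : ∀ x ∈ l₁, x ∈ l₂) :
    l₂.countP (fun t => decide (t ∈ l₁) && r t) = l₁.countP r := by
  rw [List.countP_eq_length_filter, List.countP_eq_length_filter]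
  apply List.Perm.length_eq
  apply (List.perm_ext_iff_of_nodup (List.Nodup.filter _ h2) (List.Nodup.filter _ h1)).mpr
  intro a
  simp only [List.mem_filter, Bool.and_eq_true, decide_eq_true_eq]
  constructor
  · rintro ⟨-, ha1, hr⟩; exact ⟨ha1, hr⟩
  · rintro ⟨ha1, hr⟩; exact ⟨hsub a ha1, ha1, hr⟩

theorem pairOf_eq_some (rep : String) (p : String × String) (h : pairOf rep = some p) :
    PySem.Str.split₀ rep = [p.1, p.2] := by
  unfold pairOf at h
  split at h
  · injection h with h'; subst h'; assumption
  · exact absurd h (by simp)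

theorem pvMemP (id_list report : List String)
    (hrep : ∀ rep ∈ report, (PySem.Str.split₀ rep).length = 2 ∧ ∀ t ∈ PySem.Str.split₀ rep, t ∈ id_list)
    (p : String × String) (hp : p ∈ report.filterMap pairOf) :
    p.1 ∈ id_list ∧ p.2 ∈ id_list := by
  obtain ⟨rep, hrepmem, hpo⟩ := List.mem_filterMap.mp hp
  have hsplit := pairOf_eq_some rep p hpo
  obtain ⟨-, hmem⟩ := hrep rep hrepmem
  exact ⟨hmem p.1 (by rw [hsplit]; simp), hmem p.2 (by rw [hsplit]; simp)⟩

theorem pvStOf_eq (id_list : List String) (P : List (String × String))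
    (hmem : ∀ p ∈ P, p.1 ∈ id_list ∧ p.2 ∈ id_list) (t : String) :
    pvStOf id_list P t
    = ((PySem.Set.ofList P).filter (fun p => p.2 == t)).map (fun p => pvIdx id_list p.1) := by
  unfold pvStOf
  rw [pvOfList_map_inj _ _ ?_, pvOfList_filter]
  intro x hx y hy hf
  have hx' := List.mem_filter.mp hx
  have hy' := List.mem_filter.mp hy
  have hx1 : x.1 ∈ id_list := (hmem x hx'.1).1
  have hy1 : y.1 ∈ id_list := (hmem y hy'.1).1
  have h1 : x.1 = y.1 := by
    unfold pvIdx at hf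
    have heq : List.idxOf x.1 id_list = List.idxOf y.1 id_list := by exact_mod_cast hf
    calc x.1 = id_list[List.idxOf x.1 id_list]'(List.idxOf_lt_length_of_mem hx1) :=
          (List.getElem_idxOf _).symm
      _ = id_list[List.idxOf y.1 id_list]'(List.idxOf_lt_length_of_mem hy1) := by congr 1
      _ = y.1 := List.getElem_idxOf _
  have h2 : x.2 = y.2 := by
    have hxt : x.2 = t := by simpa using hx'.2
    have hyt : y.2 = t := by simpa using hy'.2
    rw [hxt, hyt]
  exact Prod.ext h1 h2

theorem pvIdx_beq (id_list : List String) (hnd : id_list.Nodup) (a : String) (ha : a ∈ id_list)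
    (i : Nat) (hi : i < id_list.length) :
    (pvIdx id_list a == (i : Int)) = (a == id_list[i]) := by
  rw [Bool.eq_iff_iff, beq_iff_eq, beq_iff_eq]
  unfold pvIdx
  constructor
  · intro h
    have h' : List.idxOf a id_list = i := by exact_mod_cast h
    calc a = id_list[List.idxOf a id_list]'(List.idxOf_lt_length_of_mem ha) :=
          (List.getElem_idxOf _).symm
      _ = id_list[i] := by congr 1
  · intro h
    subst h
    rw [List.Nodup.idxOf_getElem hnd i hi]

theorem pvBannedContains (Q : PySem.Set (String × String)) (k : Int)
    (p : String × String) (hp : p ∈ Q) :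
    PySem.Set.contains
      (PySem.Set.ofList ((Q.filter (fun q => decide (k ≤ (Q.countP (fun r => r.2 == q.2) : Int)))).map (fun q => q.2)))
      p.2
    = decide (k ≤ (Q.countP (fun r => r.2 == p.2) : Int)) := by
  rw [Bool.eq_iff_iff, PySem.Set.contains_iff, decide_eq_true_eq]
  constructor
  · intro hmem
    obtain ⟨q, hq, hq2⟩ := List.mem_map.mp ((PySem.Set.mem_ofList _ _).mp hmem)
    obtain ⟨hqQ, hqd⟩ := List.mem_filter.mp hq
    rw [← hq2]
    simpa using hqd
  · intro hk
    apply (PySem.Set.mem_ofList _ _).mpr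
    exact List.mem_map.mpr ⟨p, List.mem_filter.mpr ⟨hp, by simpa using hk⟩, rfl⟩

theorem pvEntry (id_list report : List String) (k : Int) (hnd : id_list.Nodup)
    (hrep : ∀ rep ∈ report, (PySem.Str.split₀ rep).length = 2 ∧ ∀ t ∈ PySem.Str.split₀ rep, t ∈ id_list)
    (i : Nat) (hi : i < id_list.length) :
    (id_list.map (fun t => if PySem.Set.len (pvStOf id_list (report.filterMap pairOf) t) < k then 0
        else ((pvStOf id_list (report.filterMap pairOf) t).countP (fun x => x == (i : Int)) : Int))).sum
    = ((PySem.Set.ofList (report.filterMap pairOf)).countP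
        (fun p => p.1 == id_list[i] &&
          PySem.Set.contains
            (PySem.Set.ofList (((PySem.Set.ofList (report.filterMap pairOf)).filter
              (fun q => decide (k ≤ ((PySem.Set.ofList (report.filterMap pairOf)).countP (fun r => r.2 == q.2) : Int)))).map (fun q => q.2)))
            p.2) : Int) := by
  set P := report.filterMap pairOf with hPdef
  set Q : PySem.Set (String × String) := PySem.Set.ofList P with hQdef
  have hPm : ∀ p ∈ P, p.1 ∈ id_list ∧ p.2 ∈ id_list := pvMemP id_list report hrep
  have hQm : ∀ p ∈ Q, p.1 ∈ id_list ∧ p.2 ∈ id_list := fun p hp =>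
    hPm p ((PySem.Set.mem_ofList _ _).mp hp)
  have hQnd : Q.Nodup := PySem.Set.nodup_ofList _
  set uid := id_list[i] with huid
  -- step 1: pointwise rewrite of the A-side summand
  have hstep1 : ∀ t ∈ id_list,
      (if PySem.Set.len (pvStOf id_list P t) < k then 0
       else ((pvStOf id_list P t).countP (fun x => x == (i : Int)) : Int))
      = (if (decide (k ≤ (Q.countP (fun r => r.2 == t) : Int)) && decide ((uid, t) ∈ Q)) = true
         then (1 : Int) else 0) := by
    intro t _
    rw [pvStOf_eq id_list P hPm t]
    have hlen : PySem.Set.len ((Q.filter (fun p => p.2 == t)).map (fun p => pvIdx id_list p.1))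
        = (Q.countP (fun p => p.2 == t) : Int) := by
      simp [PySem.Set.len, List.countP_eq_length_filter]
    have hcnt : (((Q.filter (fun p => p.2 == t)).map (fun p => pvIdx id_list p.1)).countP
          (fun x => x == (i : Int)) : Int)
        = (if (uid, t) ∈ Q then (1 : Int) else 0) := by
      rw [List.countP_map, List.countP_filter]
      have hcg : (Q.countP (fun p => ((fun x => x == (i : Int)) ∘ fun p => pvIdx id_list p.1) p && p.2 == t))
          = Q.countP (fun p => p == (uid, t)) := by
        apply List.countP_congr
        intro p hp
        simp only [Function.comp_apply, Bool.and_eq_true, beq_iff_eq]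
        have hpi : (pvIdx id_list p.1 = (i : Int)) ↔ p.1 = uid := by
          have hb := pvIdx_beq id_list hnd p.1 (hQm p hp).1 i hi
          rw [Bool.eq_iff_iff, beq_iff_eq, beq_iff_eq] at hb
          exact hb
        rw [hpi]
        constructor
        · rintro ⟨h1, h2⟩
          exact Prod.ext h1 h2
        · rintro rfl
          exact ⟨rfl, rfl⟩
      rw [hcg, ← List.count_eq_countP]
      by_cases hmem : (uid, t) ∈ Q
      · rw [List.count_eq_one_of_mem hQnd hmem, if_pos hmem]
        rfl
      · rw [List.count_eq_zero_of_not_mem hmem, if_neg hmem]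
        rfl
    rw [hlen, hcnt]
    by_cases hk : k ≤ (Q.countP (fun p => p.2 == t) : Int)
    · rw [if_neg (by omega)]
      by_cases hmem : (uid, t) ∈ Q
      · simp [hk, hmem]
      · simp [hk, hmem]
    · rw [if_pos (by omega)]
      simp [hk]
  rw [List.map_congr_left hstep1, PySem.List.sum_map_ite_one_zero]
  -- step 2: the B-side countP, with banned-membership evaluated on Q
  have hstep2 : Q.countP (fun p => p.1 == uid &&
        PySem.Set.contains (PySem.Set.ofList ((Q.filter
          (fun q => decide (k ≤ (Q.countP (fun r => r.2 == q.2) : Int)))).map (fun q => q.2))) p.2)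
      = Q.countP (fun p => decide (k ≤ (Q.countP (fun r => r.2 == p.2) : Int)) && p.1 == uid) := by
    apply List.countP_congr
    intro p hp
    rw [pvBannedContains Q k p hp]
    rw [Bool.and_comm]
  rw [hstep2]
  -- step 3: the counting bijection over the targets reported by uid
  set l₁ : List String := (Q.filter (fun p => p.1 == uid)).map (fun p => p.2) with hl₁
  have hl₁nd : l₁.Nodup := by
    apply List.Nodup.map_on ?_ (List.Nodup.filter _ hQnd)
    intro x hx y hy hxy
    have hx' := List.mem_filter.mp hx
    have hy' := List.mem_filter.mp hy
    exact Prod.ext (by rw [(beq_iff_eq).mp hx'.2, (beq_iff_eq).mp hy'.2]) hxy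
  have hl₁sub : ∀ t ∈ l₁, t ∈ id_list := by
    intro t ht
    obtain ⟨p, hp, hpt⟩ := List.mem_map.mp ht
    exact hpt ▸ (hQm p (List.mem_filter.mp hp).1).2
  have hmeml₁ : ∀ t, t ∈ l₁ ↔ (uid, t) ∈ Q := by
    intro t
    constructor
    · intro ht
      obtain ⟨p, hp, hpt⟩ := List.mem_map.mp ht
      obtain ⟨hpQ, hpu⟩ := List.mem_filter.mp hp
      have : p = (uid, t) := Prod.ext (by simpa using hpu) hpt
      exact this ▸ hpQ
    · intro hQmem
      exact List.mem_map.mpr ⟨(uid, t), List.mem_filter.mpr ⟨hQmem, by simp⟩, rfl⟩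
  have hrhs : Q.countP (fun p => decide (k ≤ (Q.countP (fun r => r.2 == p.2) : Int)) && p.1 == uid)
      = l₁.countP (fun t => decide (k ≤ (Q.countP (fun r => r.2 == t) : Int))) := by
    rw [hl₁, List.countP_map, ← List.countP_filter]
    rfl
  rw [hrhs, ← pvCountP_subset l₁ id_list _ hl₁nd hnd hl₁sub]
  congr 1
  apply List.countP_congr
  intro t _
  simp only [Bool.and_eq_true, decide_eq_true_eq]
  rw [hmeml₁ t]
  tauto

theorem pv_main (id_list report : List String) (k : Int) (hnd : id_list.Nodup)
    (hrep : ∀ rep ∈ report, (PySem.Str.split₀ rep).length = 2 ∧ ∀ t ∈ PySem.Str.split₀ rep, t ∈ id_list) :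
    solution id_list report k = solution_alt id_list report k := by
  unfold solution solution_alt
  simp only []
  set f : String → PySem.Set Int := pvStOf id_list (report.filterMap pairOf) with hf
  have hbuild : buildS id_list report = id_list.map f := buildS_eq id_list report hnd hrep
  rw [hbuild]
  rw [PySem.List.pyRange_zero_natCast, List.foldl_map]
  rw [PySem.List.pyRepeat_singleton, Int.toNat_natCast]
  have hfbound : ∀ t ∈ id_list, ∀ x ∈ f t, 0 ≤ x ∧ x.toNat < id_list.length := by
    intro t ht x hx
    rw [hf, pvStOf_eq id_list _ (pvMemP id_list report hrep) t] at hx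
    obtain ⟨p, hp, hpx⟩ := List.mem_map.mp hx
    have h1 : p.1 ∈ id_list :=
      (pvMemP id_list report hrep p ((PySem.Set.mem_ofList _ _).mp (List.mem_filter.mp hp).1)).1
    subst hpx
    unfold pvIdx
    constructor
    · positivity
    · rw [Int.toNat_natCast]
      exact List.idxOf_lt_length_of_mem h1
  -- the loop body of A's final pass, as the named step function (definitionally equal)
  suffices h : (List.range id_list.length).foldl (pvStep (id_list.map f) k)
        (List.replicate id_list.length 0)
      = id_list.map (fun uid =>
          (((PySem.Set.ofList (report.filterMap pairOf)).countP (fun p => p.1 == uid &&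
            PySem.Set.contains
              (PySem.Set.ofList (((PySem.Set.ofList (report.filterMap pairOf)).filter
                (fun q => decide (k ≤ ((PySem.Set.ofList (report.filterMap pairOf)).countP
                  (fun r => r.2 == q.2) : Int)))).map (fun q => q.2)))
              p.2)) : Int)) by
    exact h
  apply List.ext_getElem
  · rw [outerFold_length, List.length_replicate, List.length_map]
  · intro i h1 h2
    have hi : i < id_list.length := by simpa using h2
    rw [← List.getD_eq_getElem _ 0 h1]
    rw [outerFoldAux id_list f k hfbound id_list.length le_rfl
        (List.replicate id_list.length 0) (List.length_replicate) i hi]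
    rw [List.take_length]
    rw [List.getD_eq_getElem _ 0 (by rw [List.length_replicate]; exact hi), List.getElem_replicate]
    rw [zero_add]
    rw [List.getElem_map]
    exact pvEntry id_list report k hnd hrep i hi

-- ===== VERDICT (by name: the statement is the Claim_ definition above) =====
theorem solution_spec : Claim_equal_solution := by
  intro id_list report k _hdom hpre
  unfold Spec_solution
  exact pv_main id_list report k hpre.1 hpre.2
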